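-- pv_equiv track=rewrite | github.com/pietervdb/peno3bteam2 | laatste_poging/help_functions.py | find_signs
-- ===== SOURCE A (Python) =====
-- def find_signs(line):
--     "Finds the signs and spaces in a line"
--     signs = []
--     i = 0
--     special_signs = [":","-"," "]
--     while i < len(line):
--         if line[i] in special_signs:
--             signs.append(i)
--         i+=1
--     return signs
-- ===== SOURCE B (Python) =====
-- def find_signs(line):
--     "Finds the signs and spaces in a line"
--     positions = []
--     for sign in (":", "-", " "):
--         j = line.find(sign)
--         while j != -1:
--             positions.append(j)
--             j = line.find(sign, j + 1)
--     return sorted(positions)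
-- ===== Notes on version B (the rewrite author's own statement) =====
-- stated objective: alternative
-- what changed: Replaces the index-by-index membership scan with a per-symbol search: for each of the three signs, repeated str.find collects that symbol's positions, and the merged list is sorted at the end.
import Mathlib
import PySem

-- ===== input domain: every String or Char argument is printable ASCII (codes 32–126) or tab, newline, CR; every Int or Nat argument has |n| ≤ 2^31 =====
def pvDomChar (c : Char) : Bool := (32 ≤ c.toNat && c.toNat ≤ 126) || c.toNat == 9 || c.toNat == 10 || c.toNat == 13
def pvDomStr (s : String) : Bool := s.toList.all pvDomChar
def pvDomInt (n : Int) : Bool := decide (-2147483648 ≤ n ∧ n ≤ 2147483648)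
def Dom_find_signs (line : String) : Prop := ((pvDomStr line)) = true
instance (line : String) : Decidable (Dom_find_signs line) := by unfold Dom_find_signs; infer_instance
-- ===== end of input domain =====

-- B replaces A's per-index membership scan by a per-symbol str.find collection plus a final sort; same results, similar cost.

-- ===== PORT A =====
-- the list ["-", ":", " "] of one-character strings, as characters
def pvSigns : List Char := [':', '-', ' ']

-- while i < len(line): if line[i] in special_signs: signs.append(i); i += 1
def pvLoopA (l : List Char) (i : Nat) (signs : List Int) : List Int :=
  if h : i < l.length then
    pvLoopA l (i + 1) (if l[i] ∈ pvSigns then signs ++ [(i : Int)] else signs)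
  else signs
termination_by l.length - i

def find_signs (line : String) : List Int := pvLoopA line.toList 0 []

-- ===== PORT B =====
-- while j != -1: positions.append(j); j = line.find(sign, j + 1)
def pvCollect (line sign : String) (fuel : Nat) (j : Int) : List Int :=
  match fuel with
  | 0 => []
  | fuel + 1 =>
    if j = -1 then []
    else j :: pvCollect line sign fuel (PySem.Str.findFrom line sign (j + 1) none)

def find_signs_alt (line : String) : List Int :=
  PySem.List.sorted
    (([":", "-", " "] : List String).flatMap
      (fun sign => pvCollect line sign (line.length + 1) (PySem.Str.find line sign)))
    (fun x => x) false

-- ===== PRECONDITION & SPEC =====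
def Spec_find_signs (line : String) (out : List Int) : Prop := out = find_signs_alt line
instance (line : String) (out : List Int) : Decidable (Spec_find_signs line out) := by unfold Spec_find_signs; infer_instance

-- ===== CLAIM (what is proved, stated in full; the proofs are below) =====
def Claim_equal_find_signs : Prop := ∀ (line : String), Dom_find_signs line → Spec_find_signs line (find_signs line)

-- ===== LEMMAS AND PROOFS =====

-- indices ≥ i whose character is in pvSigns, ascending
def occS (l : List Char) (i : Nat) : List Int :=
  if h : i < l.length then
    (if l[i] ∈ pvSigns then [(i : Int)] else []) ++ occS l (i + 1)
  else []
termination_by l.length - i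

-- indices ≥ i whose character equals c, ascending
def occC (l : List Char) (c : Char) (i : Nat) : List Int :=
  if h : i < l.length then
    (if l[i] = c then [(i : Int)] else []) ++ occC l c (i + 1)
  else []
termination_by l.length - i

theorem occS_pos (l : List Char) (i : Nat) (h : i < l.length) :
    occS l i = (if l[i] ∈ pvSigns then [(i : Int)] else []) ++ occS l (i + 1) := by
  rw [occS]; simp [h]

theorem occS_neg (l : List Char) (i : Nat) (h : ¬ i < l.length) : occS l i = [] := by
  rw [occS]; simp [h]

theorem occC_pos (l : List Char) (c : Char) (i : Nat) (h : i < l.length) :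
    occC l c i = (if l[i] = c then [(i : Int)] else []) ++ occC l c (i + 1) := by
  rw [occC]; simp [h]

theorem occC_neg (l : List Char) (c : Char) (i : Nat) (h : ¬ i < l.length) : occC l c i = [] := by
  rw [occC]; simp [h]

theorem pvLoopA_eq (l : List Char) (i : Nat) (signs : List Int) :
    pvLoopA l i signs = signs ++ occS l i := by
  induction hn : l.length - i using Nat.strong_induction_on generalizing i signs with
  | _ n ih =>
    rw [pvLoopA, occS]
    by_cases h : i < l.length
    · simp only [dif_pos h]
      rw [ih (l.length - (i+1)) (by omega) (i+1) _ rfl]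
      split_ifs <;> simp
    · simp [h]

theorem prefix_single (c : Char) (l : List Char) (m : Nat) :
    [c] <+: l.drop m ↔ ∃ h : m < l.length, l[m] = c := by
  constructor
  · rintro ⟨t, ht⟩
    have hm : m < l.length := by
      by_contra h
      rw [List.drop_eq_nil_of_le (by omega)] at ht
      simp at ht
    rw [List.drop_eq_getElem_cons hm] at ht
    rw [List.singleton_append] at ht
    injection ht with h1 _
    exact ⟨hm, h1.symm⟩
  · rintro ⟨hm, hc⟩
    rw [List.drop_eq_getElem_cons hm, hc]
    exact ⟨l.drop (m+1), rfl⟩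

theorem infix_drop_iff (c : Char) (l : List Char) (k : Nat) :
    [c] <:+: l.drop k ↔ ∃ m, k ≤ m ∧ ∃ h : m < l.length, l[m] = c := by
  rw [← PySem.Chars.isIn_iff_infix, ← PySem.Chars.exists_prefix_drop_iff_isIn]
  constructor
  · rintro ⟨j, hj⟩
    rw [List.drop_drop, prefix_single] at hj
    obtain ⟨h1, h2⟩ := hj
    exact ⟨k + j, by omega, h1, h2⟩
  · rintro ⟨m, hkm, hm, hc⟩
    refine ⟨m - k, ?_⟩
    rw [List.drop_drop, show k + (m - k) = m from by omega, prefix_single]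
    exact ⟨hm, hc⟩

-- the first-occurrence characterisation of findFrom in terms of occC
theorem findFrom_occC (l : List Char) (c : Char) (k : Nat) (hk : k ≤ l.length) :
    PySem.Chars.findFrom l [c] k none =
      match occC l c k with
      | [] => -1
      | j :: _ => j := by
  induction hn : l.length - k using Nat.strong_induction_on generalizing k with
  | _ n ih =>
    rw [occC]
    by_cases h : k < l.length
    · by_cases hc : l[k] = c
      · -- first occurrence is k
        simp only [dif_pos h, if_pos hc, List.singleton_append]
        have hne : PySem.Chars.findFrom l [c] (k : Nat) none ≠ -1 := by
          rw [Ne, PySem.Chars.findFrom_natCast_eq_neg_one_iff l [c] k hk, not_not,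
            infix_drop_iff]
          exact ⟨k, le_refl k, h, hc⟩
        obtain ⟨h1, h2, h3⟩ := PySem.Chars.findFrom_natCast_spec l [c] k hk hne
        set r := PySem.Chars.findFrom l [c] (k : Nat) none with hr
        by_cases hrk : r = (k : Int)
        · exact hrk
        · exfalso
          exact h3 k (le_refl _) (by omega) ((prefix_single c l k).mpr ⟨h, hc⟩)
      · -- skip k: findFrom from k equals findFrom from k+1
        simp only [dif_pos h, if_neg hc, List.nil_append]
        rw [← ih (l.length - (k+1)) (by omega) (k+1) (by omega) rfl]
        by_cases hinf : [c] <:+: l.drop (k+1)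
        · have hne1 : PySem.Chars.findFrom l [c] ((k+1 : Nat)) none ≠ -1 := by
            rw [Ne, PySem.Chars.findFrom_natCast_eq_neg_one_iff l [c] (k+1) (by omega)]
            simpa using hinf
          have hne0 : PySem.Chars.findFrom l [c] (k : Nat) none ≠ -1 := by
            rw [Ne, PySem.Chars.findFrom_natCast_eq_neg_one_iff l [c] k hk, not_not,
              infix_drop_iff]
            obtain ⟨m, hm, h1, h2⟩ := (infix_drop_iff c l (k+1)).mp hinf
            exact ⟨m, by omega, h1, h2⟩
          obtain ⟨a1, a2, a3⟩ := PySem.Chars.findFrom_natCast_spec l [c] k hk hne0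
          obtain ⟨b1, b2, b3⟩ := PySem.Chars.findFrom_natCast_spec l [c] (k+1) (by omega) hne1
          set r0 := PySem.Chars.findFrom l [c] (k : Nat) none
          set r1 := PySem.Chars.findFrom l [c] ((k+1 : Nat)) none
          have hr0k : r0 ≠ (k : Int) := by
            intro he
            rw [he] at a2
            simp only [Int.toNat_natCast] at a2
            exact hc ((prefix_single c l k).mp a2).2
          have hb1 : ((k : Int) + 1) ≤ r1 := by exact_mod_cast b1
          have h01 : r0 ≤ r1 := by
            by_contra hlt
            exact a3 r1.toNat (by omega) (by omega) (by simpa using b2)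
          have h10 : r1 ≤ r0 := by
            by_contra hlt
            exact b3 r0.toNat (by omega) (by omega) (by simpa using a2)
          omega
        · have e1 : PySem.Chars.findFrom l [c] ((k+1 : Nat)) none = -1 := by
            rw [PySem.Chars.findFrom_natCast_eq_neg_one_iff l [c] (k+1) (by omega)]
            simpa using hinf
          have e0 : PySem.Chars.findFrom l [c] (k : Nat) none = -1 := by
            rw [PySem.Chars.findFrom_natCast_eq_neg_one_iff l [c] k hk, infix_drop_iff]
            rintro ⟨m, hm, h1, h2⟩
            rcases Nat.eq_or_lt_of_le hm with he | hlt
            · exact hc (he ▸ h2)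
            · exact hinf ((infix_drop_iff c l (k+1)).mpr ⟨m, by omega, h1, h2⟩)
          rw [e0, e1]
    · -- k = l.length: no occurrence
      simp only [dif_neg h]
      rw [PySem.Chars.findFrom_natCast_eq_neg_one_iff l [c] k hk, infix_drop_iff]
      rintro ⟨m, hm, h1, _⟩
      omega

-- head decomposition of occC: the first listed occurrence, with its tail
theorem occC_cons (l : List Char) (c : Char) (k : Nat) (j : Int) (t : List Int)
    (he : occC l c k = j :: t) :
    ∃ m : Nat, k ≤ m ∧ m < l.length ∧ j = (m : Int) ∧ t = occC l c (m + 1) := by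
  induction hn : l.length - k using Nat.strong_induction_on generalizing k with
  | _ n ih =>
    by_cases h : k < l.length
    · by_cases hc : l[k] = c
      · rw [occC_pos l c k h, if_pos hc, List.singleton_append] at he
        injection he with h1 h2
        exact ⟨k, le_refl k, h, h1.symm, h2.symm⟩
      · rw [occC_pos l c k h, if_neg hc, List.nil_append] at he
        obtain ⟨m, hm1, hm2, hm3, hm4⟩ := ih (l.length - (k+1)) (by omega) (k+1) he rfl
        exact ⟨m, by omega, hm2, hm3, hm4⟩
    · rw [occC_neg l c k h] at he
      exact absurd he (by simp)

theorem pvCollect_eq (line sign : String) (c : Char) (hs : sign.toList = [c])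
    (fuel : Nat) (k : Nat) (hk : k ≤ line.toList.length)
    (hf : line.toList.length + 1 - k ≤ fuel) :
    pvCollect line sign fuel (PySem.Chars.findFrom line.toList [c] k none) =
      occC line.toList c k := by
  induction fuel generalizing k with
  | zero => omega
  | succ fuel ih =>
    rw [findFrom_occC line.toList c k hk]
    cases hocc : occC line.toList c k with
    | nil => rw [pvCollect]; simp
    | cons j t =>
      obtain ⟨m, hm1, hm2, hm3, hm4⟩ := occC_cons line.toList c k j t hocc
      rw [pvCollect]
      rw [if_neg (by omega : ¬ j = -1)]
      congr 1
      have hbr : PySem.Str.findFrom line sign (j + 1) none =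
          PySem.Chars.findFrom line.toList [c] ((m + 1 : Nat)) none := by
        rw [PySem.Str.findFrom_eq, hs, hm3]; norm_cast
      rw [hbr, ih (m + 1) (by omega) (by omega), hm4]

theorem occS_ge (l : List Char) (i : Nat) (x : Int) (hx : x ∈ occS l i) : (i : Int) ≤ x := by
  induction hn : l.length - i using Nat.strong_induction_on generalizing i with
  | _ n ih =>
    rw [occS] at hx
    by_cases h : i < l.length
    · rw [dif_pos h] at hx
      rcases List.mem_append.mp hx with h1 | h1
      · split_ifs at h1 <;> simp_all
      · have := ih (l.length - (i+1)) (by omega) (i+1) h1 rfl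
        omega
    · rw [dif_neg h] at hx; simp at hx

theorem occS_pairwise (l : List Char) (i : Nat) : (occS l i).Pairwise (· < ·) := by
  induction hn : l.length - i using Nat.strong_induction_on generalizing i with
  | _ n ih =>
    rw [occS]
    by_cases h : i < l.length
    · rw [dif_pos h]
      have htail := ih (l.length - (i+1)) (by omega) (i+1) rfl
      split_ifs
      · refine List.pairwise_cons.mpr ⟨?_, htail⟩
        intro x hx
        have := occS_ge l (i+1) x hx
        omega
      · simpa using htail
    · rw [dif_neg h]; simp

theorem occS_perm (l : List Char) (i : Nat) :
    (occS l i).Perm (occC l ':' i ++ occC l '-' i ++ occC l ' ' i) := by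
  induction hn : l.length - i using Nat.strong_induction_on generalizing i with
  | _ n ih =>
    by_cases h : i < l.length
    · rw [occS_pos l i h, occC_pos l ':' i h, occC_pos l '-' i h, occC_pos l ' ' i h]
      have IH := ih (l.length - (i+1)) (by omega) (i+1) rfl
      by_cases h1 : l[i] = ':'
      · have h2 : l[i] ≠ '-' := by simp [h1]
        have h3 : l[i] ≠ ' ' := by simp [h1]
        have hm : l[i] ∈ pvSigns := by simp [h1, pvSigns]
        simp only [if_pos h1, if_neg h2, if_neg h3, if_pos hm, List.nil_append,
          List.singleton_append]
        exact IH.cons _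
      · by_cases h2 : l[i] = '-'
        · have h3 : l[i] ≠ ' ' := by simp [h2]
          have hm : l[i] ∈ pvSigns := by simp [h2, pvSigns]
          simp only [if_neg h1, if_pos h2, if_neg h3, if_pos hm, List.nil_append,
            List.singleton_append]
          refine (IH.cons ((i : Nat) : Int)).trans ?_
          simpa [List.append_assoc] using
            (List.perm_middle (a := ((i : Nat) : Int)) (l₁ := occC l ':' (i+1))
              (l₂ := occC l '-' (i+1) ++ occC l ' ' (i+1))).symm
        · by_cases h3 : l[i] = ' '
          · have hm : l[i] ∈ pvSigns := by simp [h3, pvSigns]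
            simp only [if_neg h1, if_neg h2, if_pos h3, if_pos hm, List.nil_append,
              List.singleton_append]
            refine (IH.cons ((i : Nat) : Int)).trans ?_
            simpa [List.append_assoc] using
              (List.perm_middle (a := ((i : Nat) : Int))
                (l₁ := occC l ':' (i+1) ++ occC l '-' (i+1))
                (l₂ := occC l ' ' (i+1))).symm
          · have hm : l[i] ∉ pvSigns := by simp [pvSigns, h1, h2, h3]
            simp only [if_neg h1, if_neg h2, if_neg h3, if_neg hm, List.nil_append]
            exact IH
    · rw [occS_neg l i h, occC_neg l ':' i h, occC_neg l '-' i h, occC_neg l ' ' i h]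
      simp

-- ===== VERDICT (by name: the statement is the Claim_ definition above) =====
theorem find_signs_spec : Claim_equal_find_signs := by
  intro line _
  unfold Spec_find_signs find_signs find_signs_alt
  rw [pvLoopA_eq, List.nil_append]
  have hcollect : ∀ (sign : String) (c : Char), sign.toList = [c] →
      pvCollect line sign (line.length + 1) (PySem.Str.find line sign) =
        occC line.toList c 0 := by
    intro sign c hs
    have h0 : PySem.Str.find line sign = PySem.Chars.findFrom line.toList [c] ((0 : Nat)) none := by
      rw [PySem.Str.find_eq, hs]
      simp
    rw [h0]
    exact pvCollect_eq line sign c hs (line.length + 1) 0 (by omega) (by simp)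
  have hflat : (([":", "-", " "] : List String).flatMap
      (fun sign => pvCollect line sign (line.length + 1) (PySem.Str.find line sign))) =
      occC line.toList ':' 0 ++ occC line.toList '-' 0 ++ occC line.toList ' ' 0 := by
    simp only [List.flatMap_cons, List.flatMap_nil, List.append_nil]
    rw [hcollect ":" ':' rfl, hcollect "-" '-' rfl, hcollect " " ' ' rfl, List.append_assoc]
  rw [hflat]
  exact Eq.symm (PySem.List.sorted_eq_of_perm_of_pairwise_lt _ _ _
    (occS_perm line.toList 0) (occS_pairwise line.toList 0))
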